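-- pv_equiv track=rewrite | github.com/wouterpeere/GHEtool | GHEtool/GHEtool.py | _calc_number_boreholes
-- ===== SOURCE A (Python) =====
-- def _calc_number_boreholes(n_min: int, N1_max: int, N2_max: int) -> list:
--     """
--     calculation for number of boreholes which is higher than n but minimal total number
--
--     :param n_min: minimal number of boreholes
--     :param N1_max: maximal width of rectangular field (#)
--     :param N2_max: maximal length of rectangular field (#)
--     :return: list of possible solutions
--     """
--     # set default result
--     res = [(20, 20)]
--     # set maximal number
--     max_val = 20 * 20
--     # loop over maximal number in width and length
--     for i in range(1, N1_max + 1):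
--         for j in range(1, min(N2_max, i) + 1):
--             # determine current number
--             current_number: int = i * j
--             # save number of boreholes  and maximal value if is lower than current maximal value and higher than
--             # minimal value
--             if n_min <= current_number < max_val:
--                 res = [(i, j)]
--                 max_val = current_number
--             # also append combination if current number is equal to current maximal value
--             elif current_number == max_val:
--                 res.append((i, j))
--     # return list of possible solutions
--     return res
-- ===== SOURCE B (Python) =====
-- def _calc_number_boreholes(n_min: int, N1_max: int, N2_max: int) -> list:
--     """For each width i only the smallest length j = ceil(n_min / i) can give the
--     minimal total, so one O(N1_max) pass finds the minimum; fields larger than the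
--     20 x 20 default (400 boreholes) are never proposed, so 400 is the cap and the
--     fallback candidate.  The tied solutions are then read off as divisor pairs."""
--     best = 400
--     for i in range(1, N1_max + 1):
--         j = max(1, -(-n_min // i))
--         if j <= min(N2_max, i):
--             best = min(best, i * j)
--     pairs = [(i, best // i) for i in range(1, N1_max + 1)
--              if best % i == 0 and best // i <= min(N2_max, i)]
--     if best == 400:
--         return [(20, 20)] + pairs
--     return pairs
-- ===== Notes on version B (the rewrite author's own statement) =====
-- stated objective: faster
-- what changed: Replaces A's nested scan over all (i,j) pairs with one O(N1) pass over widths i (only j = ceil(n_min/i) can realise the minimal total, capped at the 400-borehole default), then rebuilds the tied solution list from divisor pairs of the minimum.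
import Mathlib
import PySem

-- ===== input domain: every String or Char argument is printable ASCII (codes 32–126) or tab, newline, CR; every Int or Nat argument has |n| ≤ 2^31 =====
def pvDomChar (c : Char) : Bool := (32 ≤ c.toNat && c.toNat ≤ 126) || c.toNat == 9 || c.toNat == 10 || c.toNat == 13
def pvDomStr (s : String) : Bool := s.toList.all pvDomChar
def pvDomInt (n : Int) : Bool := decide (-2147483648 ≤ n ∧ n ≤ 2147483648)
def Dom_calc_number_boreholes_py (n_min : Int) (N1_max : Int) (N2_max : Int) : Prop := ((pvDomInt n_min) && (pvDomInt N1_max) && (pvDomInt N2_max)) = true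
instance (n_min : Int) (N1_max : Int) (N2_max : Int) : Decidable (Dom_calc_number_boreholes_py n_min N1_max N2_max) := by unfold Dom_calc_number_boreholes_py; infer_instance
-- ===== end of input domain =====

-- B replaces A's O(N1*N2) nested scan by one O(N1) pass over widths (only
-- j = ceil(n_min/i) can realise the minimum, capped at the 400-borehole default)
-- plus a divisor-pair rebuild of the tied solutions.

-- ===== PORT A =====
def calc_number_boreholes_py (n_min : Int) (N1_max : Int) (N2_max : Int) : List (Int × Int) :=
  ((PySem.List.pyRange 1 (N1_max + 1) 1).foldl
    (fun (st : List (Int × Int) × Int) i =>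
      (PySem.List.pyRange 1 (min N2_max i + 1) 1).foldl
        (fun (st : List (Int × Int) × Int) j =>
          let current := i * j
          if n_min ≤ current ∧ current < st.2 then ([(i, j)], current)
          else if current = st.2 then (st.1 ++ [(i, j)], st.2)
          else st) st)
    ([((20 : Int), (20 : Int))], (400 : Int))).1

-- ===== PORT B =====
def calc_number_boreholes_py_alt (n_min : Int) (N1_max : Int) (N2_max : Int) : List (Int × Int) :=
  let best : Int :=
    (PySem.List.pyRange 1 (N1_max + 1) 1).foldl
      (fun (best : Int) i =>
        let j := max 1 (-(PySem.Int.floordiv (-n_min) i))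
        if j ≤ min N2_max i then min best (i * j) else best) 400
  let pairs : List (Int × Int) :=
    (PySem.List.pyRange 1 (N1_max + 1) 1).filterMap (fun i =>
      if PySem.Int.mod best i = 0 ∧ PySem.Int.floordiv best i ≤ min N2_max i then
        some (i, PySem.Int.floordiv best i) else none)
  if best = 400 then ((20 : Int), (20 : Int)) :: pairs else pairs

-- ===== PRECONDITION & SPEC =====
def Spec_calc_number_boreholes_py (n_min : Int) (N1_max : Int) (N2_max : Int) (out : List (Int × Int)) : Prop := out = calc_number_boreholes_py_alt n_min N1_max N2_max
instance (n_min : Int) (N1_max : Int) (N2_max : Int) (out : List (Int × Int)) : Decidable (Spec_calc_number_boreholes_py n_min N1_max N2_max out) := by unfold Spec_calc_number_boreholes_py; infer_instance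

-- ===== CLAIM (what is proved, stated in full; the proofs are below) =====
def Claim_equal_calc_number_boreholes_py : Prop := ∀ (n_min : Int) (N1_max : Int) (N2_max : Int), Dom_calc_number_boreholes_py n_min N1_max N2_max → Spec_calc_number_boreholes_py n_min N1_max N2_max (calc_number_boreholes_py n_min N1_max N2_max)

-- ===== LEMMAS AND PROOFS =====

/-- product of a pair -/
def pvProd (x : Int × Int) : Int := x.1 * x.2

/-- A's loop body, as a step function over the flattened pair list -/
def pvStep (n_min : Int) (st : List (Int × Int) × Int) (x : Int × Int) : List (Int × Int) × Int :=
  if n_min ≤ pvProd x ∧ pvProd x < st.2 then ([x], pvProd x)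
  else if pvProd x = st.2 then (st.1 ++ [x], st.2) else st

/-- the evolution of A's `max_val` alone -/
def pvMvStep (n_min mv p : Int) : Int := if n_min ≤ p ∧ p < mv then p else mv

/-- the flattened list of pairs A visits, in visiting order -/
def pvPairs (N1 N2 : Int) : List (Int × Int) :=
  (PySem.List.pyRange 1 (N1 + 1) 1).flatMap
    (fun i => (PySem.List.pyRange 1 (min N2 i + 1) 1).map (fun j => (i, j)))

/-- final value of A's `max_val` -/
def pvMv (n_min : Int) (L : List (Int × Int)) : Int :=
  L.foldl (fun mv x => pvMvStep n_min mv (pvProd x)) 400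

/-- B's `j = max(1, ceil(n_min / i))` -/
def pvCeil (n_min i : Int) : Int := max 1 (-(PySem.Int.floordiv (-n_min) i))

-- ---- generic facts about the max_val fold ----

theorem pvMvF_le (n : Int) (L : List (Int × Int)) (mv : Int) :
    L.foldl (fun mv x => pvMvStep n mv (pvProd x)) mv ≤ mv := by
  induction L generalizing mv with
  | nil => simp
  | cons y t ih =>
      simp only [List.foldl_cons]
      refine le_trans (ih _) ?_
      simp only [pvMvStep]; split <;> omega

theorem pvMvF_le_mem (n : Int) (L : List (Int × Int)) (mv : Int) (x : Int × Int)
    (hx : x ∈ L) (hn : n ≤ pvProd x) :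
    L.foldl (fun mv x => pvMvStep n mv (pvProd x)) mv ≤ pvProd x := by
  induction L generalizing mv with
  | nil => cases hx
  | cons y t ih =>
      simp only [List.foldl_cons]
      rcases List.mem_cons.mp hx with h | h
      · subst h
        refine le_trans (pvMvF_le n t _) ?_
        simp only [pvMvStep]; split <;> omega
      · exact ih _ h

theorem pvMvF_cases (n : Int) (L : List (Int × Int)) (mv : Int) :
    L.foldl (fun mv x => pvMvStep n mv (pvProd x)) mv = mv ∨
      ∃ x ∈ L, L.foldl (fun mv x => pvMvStep n mv (pvProd x)) mv = pvProd x ∧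
        n ≤ L.foldl (fun mv x => pvMvStep n mv (pvProd x)) mv := by
  induction L generalizing mv with
  | nil => left; rfl
  | cons y t ih =>
      simp only [List.foldl_cons]
      rcases ih (pvMvStep n mv (pvProd y)) with h | ⟨x, hx, h1, h2⟩
      · rw [h]
        simp only [pvMvStep]
        split
        · right; exact ⟨y, List.mem_cons_self .., by simp_all, by simp_all⟩
        · left; rfl
      · right; exact ⟨x, List.mem_cons_of_mem _ hx, h1, h2⟩

-- ---- characterisation of A's full state ----

theorem pvA_char (n : Int) (L : List (Int × Int)) :
    L.foldl (pvStep n) ([((20 : Int), (20 : Int))], (400 : Int)) =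
      (if pvMv n L < 400 then L.filter (fun x => decide (pvProd x = pvMv n L))
       else ((20 : Int), (20 : Int)) :: L.filter (fun x => decide (pvProd x = 400)),
       pvMv n L) := by
  induction L using List.reverseRecOn with
  | nil => simp [pvMv]
  | append_singleton t x ih =>
      have hmv : pvMv n (t ++ [x]) = pvMvStep n (pvMv n t) (pvProd x) := by
        simp [pvMv, List.foldl_append]
      have hle : pvMv n t ≤ 400 := pvMvF_le n t 400
      rw [List.foldl_append, ih, List.foldl_cons, List.foldl_nil]
      by_cases h1 : n ≤ pvProd x ∧ pvProd x < pvMv n t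
      · -- reset: no earlier pair can have this (smaller) product
        have hm' : pvMv n (t ++ [x]) = pvProd x := by
          rw [hmv]; unfold pvMvStep; rw [if_pos h1]
        have hfil : t.filter (fun y => decide (pvProd y = pvProd x)) = [] := by
          rw [List.filter_eq_nil_iff]
          intro y hy hyp
          have hyx : pvProd y = pvProd x := of_decide_eq_true hyp
          have : pvMv n t ≤ pvProd y :=
            pvMvF_le_mem n t 400 y hy (by omega)
          omega
        have hlt : pvProd x < 400 := by omega
        simp only [hm', pvStep]
        rw [if_pos (by exact h1), if_pos hlt, List.filter_append, hfil]
        simp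
      · by_cases h2 : pvProd x = pvMv n t
        · have hm' : pvMv n (t ++ [x]) = pvMv n t := by
            rw [hmv]; unfold pvMvStep; rw [if_neg h1]
          simp only [hm', pvStep]
          rw [if_neg (by simpa using h1)]
          by_cases h3 : pvMv n t < 400
          · rw [if_pos h3, if_pos h3, if_pos (by simpa using h2), List.filter_append]
            simp [h2]
          · have h400 : pvMv n t = 400 := by omega
            rw [if_neg h3, if_neg h3, if_pos (by simpa using h2), List.filter_append]
            simp [h2, h400]
        · have hm' : pvMv n (t ++ [x]) = pvMv n t := by
            rw [hmv]; unfold pvMvStep; rw [if_neg h1]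
          simp only [hm', pvStep]
          rw [if_neg (by simpa using h1)]
          by_cases h3 : pvMv n t < 400
          · rw [if_pos h3, if_pos h3, if_neg (by simpa using h2), List.filter_append]
            simp [h2]
          · have h400 : pvMv n t = 400 := by omega
            rw [if_neg h3, if_neg h3, if_neg (by simpa using h2), List.filter_append]
            have : pvProd x ≠ 400 := by omega
            simp [this]

-- A's port equals the abstract fold over the flattened pair list
theorem pvA_eq (n N1 N2 : Int) :
    calc_number_boreholes_py n N1 N2 =
      ((pvPairs N1 N2).foldl (pvStep n) ([((20 : Int), (20 : Int))], (400 : Int))).1 := by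
  unfold calc_number_boreholes_py pvPairs
  rw [List.foldl_flatMap]
  congr 2
  funext st i
  rw [List.foldl_map]
  rfl

-- ---- arithmetic facts about the ceiling j0 = pvCeil ----

theorem pvCeil_ge_one (n i : Int) : 1 ≤ pvCeil n i := le_max_left 1 _

theorem pvCeil_bounds (n i : Int) (hi : 0 < i) :
    n ≤ i * pvCeil n i ∧ ∀ j : Int, 1 ≤ j → j < pvCeil n i → i * j < n := by
  set ce := -(PySem.Int.floordiv (-n) i) with hce
  have hspec : (ce - 1) * i < n ∧ n ≤ ce * i :=
    (PySem.Int.neg_floordiv_neg_eq_iff_of_pos hi).mp hce.symm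
  constructor
  · have : ce * i ≤ pvCeil n i * i :=
      mul_le_mul_of_nonneg_right (le_max_right 1 ce) (by omega)
    calc n ≤ ce * i := hspec.2
      _ ≤ pvCeil n i * i := this
      _ = i * pvCeil n i := by ring
  · intro j hj hjlt
    have hcele : pvCeil n i = max 1 ce := rfl
    have hje : j ≤ ce - 1 := by
      rcases max_cases 1 ce with ⟨h, _⟩ | ⟨h, _⟩ <;> rw [hcele, h] at hjlt <;> omega
    have : i * j ≤ i * (ce - 1) := mul_le_mul_of_nonneg_left hje (by omega)
    have h2 : i * (ce - 1) = (ce - 1) * i := by ring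
    omega

-- ---- the inner j-loop of A's max_val, collapsed to B's single candidate ----

theorem pv_inner_mv (n i : Int) (hi : 1 ≤ i) (c : Int) : ∀ mv : Int,
    (PySem.List.pyRange 1 (c + 1) 1).foldl (fun mv j => pvMvStep n mv (i * j)) mv =
      if pvCeil n i ≤ c ∧ i * pvCeil n i < mv then i * pvCeil n i else mv := by
  induction c using Int.induction_on with
  | zero =>
      intro mv
      rw [PySem.List.pyRange_one_eq_nil (by omega)]
      have := pvCeil_ge_one n i
      simp only [List.foldl_nil]
      rw [if_neg (by omega)]
  | succ k ih =>
      intro mv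
      rw [PySem.List.pyRange_one_succ_right (by omega), List.foldl_append, ih]
      have hb := pvCeil_bounds n i (by omega)
      have h1 := pvCeil_ge_one n i
      simp only [List.foldl_cons, List.foldl_nil, pvMvStep]
      by_cases hA : pvCeil n i ≤ (k : Int) ∧ i * pvCeil n i < mv
      · rw [if_pos hA]
        have hmono : i * pvCeil n i ≤ i * ((k : Int) + 1) :=
          mul_le_mul_of_nonneg_left (by omega) (by omega)
        rw [if_neg (by omega), if_pos (by constructor <;> omega)]
      · rw [if_neg hA]
        by_cases hB : pvCeil n i = (k : Int) + 1
        · by_cases hC : i * pvCeil n i < mv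
          · rw [← hB, if_pos ⟨hb.1, hC⟩, if_pos (by constructor <;> omega)]
          · rw [← hB, if_neg (by omega), if_neg (by omega)]
        · by_cases hD : pvCeil n i ≤ (k : Int)
          · -- then i * pvCeil ≥ mv; the new element is even larger
            have hge : ¬ i * pvCeil n i < mv := by tauto
            have hmono : i * pvCeil n i ≤ i * ((k : Int) + 1) :=
              mul_le_mul_of_nonneg_left (by omega) (by omega)
            rw [if_neg (by omega), if_neg (by omega)]
          · -- k+1 < pvCeil: the new element's product is below n
            have hlt : i * ((k : Int) + 1) < n := hb.2 _ (by omega) (by omega)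
            rw [if_neg (by omega), if_neg (by omega)]
  | pred k _ =>
      intro mv
      rw [PySem.List.pyRange_one_eq_nil (by omega)]
      have := pvCeil_ge_one n i
      simp only [List.foldl_nil]
      rw [if_neg (by omega)]

-- A's max_val over all pairs, as a per-width fold
theorem pv_mv_outer (n N1 N2 : Int) :
    pvMv n (pvPairs N1 N2) =
      (PySem.List.pyRange 1 (N1 + 1) 1).foldl
        (fun mv i => if pvCeil n i ≤ min N2 i ∧ i * pvCeil n i < mv then i * pvCeil n i else mv)
        400 := by
  unfold pvMv pvPairs
  rw [List.foldl_flatMap]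
  refine PySem.List.foldl_congr_mem _ _ _ _ ?_
  intro mv i hi
  have hi1 : 1 ≤ i := ((PySem.List.mem_pyRange_one).mp hi).1
  rw [List.foldl_map]
  exact pv_inner_mv n i hi1 (min N2 i) mv

-- ---- B's running minimum is the same fold ----

theorem pv_best_eq (n N2 : Int) (l : List Int) (mv : Int) :
    l.foldl (fun (best : Int) i =>
        let j := max 1 (-(PySem.Int.floordiv (-n) i))
        if j ≤ min N2 i then min best (i * j) else best) mv =
      l.foldl (fun mv i =>
        if pvCeil n i ≤ min N2 i ∧ i * pvCeil n i < mv then i * pvCeil n i else mv) mv := by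
  have hf : (fun (best : Int) i =>
        let j := max 1 (-(PySem.Int.floordiv (-n) i))
        if j ≤ min N2 i then min best (i * j) else best) =
      (fun mv i =>
        if pvCeil n i ≤ min N2 i ∧ i * pvCeil n i < mv then i * pvCeil n i else mv) := by
    funext b i
    show (if pvCeil n i ≤ min N2 i then min b (i * pvCeil n i) else b) = _
    split_ifs with h1 h2 h3 <;> omega
  rw [hf]

-- ---- the filtered pair list is B's divisor-pair list ----

theorem pv_filter_range (i m : Int) (hi : 1 ≤ i) (hm : 1 ≤ m) (c : Int) :
    (PySem.List.pyRange 1 (c + 1) 1).filter (fun j => decide (i * j = m)) =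
      if PySem.Int.mod m i = 0 ∧ PySem.Int.floordiv m i ≤ c
      then [PySem.Int.floordiv m i] else [] := by
  have hdiv1 : PySem.Int.mod m i = 0 → 1 ≤ PySem.Int.floordiv m i := by
    intro h
    have he : PySem.Int.floordiv m i * i + PySem.Int.mod m i = m :=
      PySem.Int.floordiv_mul_add_mod m i
    rw [h, add_zero] at he
    by_contra hlt
    nlinarith [he]
  have hkey : ∀ j : Int, i * j = m ↔ (PySem.Int.mod m i = 0 ∧ PySem.Int.floordiv m i = j) := by
    intro j
    constructor
    · intro h
      have hd : i ∣ m := ⟨j, h.symm⟩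
      refine ⟨(PySem.Int.mod_eq_zero_iff_dvd m i).mpr hd, ?_⟩
      rw [PySem.Int.floordiv_eq_iff_of_pos (by omega)]
      constructor <;> nlinarith [h]
    · rintro ⟨h0, hq⟩
      have he := PySem.Int.floordiv_mul_add_mod m i
      rw [h0, add_zero, hq] at he
      nlinarith [he]
  induction c using Int.induction_on with
  | zero =>
      rw [PySem.List.pyRange_one_eq_nil (by omega)]
      rw [if_neg (by intro h; have := hdiv1 h.1; omega)]
      simp
  | succ k ih =>
      rw [PySem.List.pyRange_one_succ_right (by omega), List.filter_append, ih]
      by_cases hj : i * ((k : Int) + 1) = m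
      · have hc := (hkey _).mp hj
        have hq : PySem.Int.floordiv m i = (k : Int) + 1 := hc.2
        rw [if_neg (by rintro ⟨-, hle⟩; omega)]
        have hsing : List.filter (fun j => decide (i * j = m)) [(k : Int) + 1] =
            [(k : Int) + 1] := by simp [hj]
        rw [hsing, if_pos ⟨hc.1, by omega⟩, hq]
        simp
      · have hsing : List.filter (fun j => decide (i * j = m)) [(k : Int) + 1] = [] := by
          simp [hj]
        rw [hsing, List.append_nil]
        have hiff : (PySem.Int.mod m i = 0 ∧ PySem.Int.floordiv m i ≤ (k : Int)) ↔
            (PySem.Int.mod m i = 0 ∧ PySem.Int.floordiv m i ≤ (k : Int) + 1) := by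
          constructor
          · rintro ⟨h0, hle⟩; exact ⟨h0, by omega⟩
          · rintro ⟨h0, hle⟩
            refine ⟨h0, ?_⟩
            by_contra h4
            exact hj ((hkey _).mpr ⟨h0, by omega⟩)
        rw [if_congr hiff rfl rfl]
  | pred k _ =>
      rw [PySem.List.pyRange_one_eq_nil (by omega)]
      rw [if_neg (by intro h; have := hdiv1 h.1; omega)]
      simp

theorem pv_filter_pairs (N1 N2 m : Int) (hm : 1 ≤ m) :
    (pvPairs N1 N2).filter (fun x => decide (pvProd x = m)) =
      (PySem.List.pyRange 1 (N1 + 1) 1).filterMap (fun i =>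
        if PySem.Int.mod m i = 0 ∧ PySem.Int.floordiv m i ≤ min N2 i
        then some (i, PySem.Int.floordiv m i) else none) := by
  unfold pvPairs
  rw [List.filter_flatMap, List.filterMap_eq_flatMap_toList]
  apply List.flatMap_congr
  intro i hi
  have hi1 : 1 ≤ i := ((PySem.List.mem_pyRange_one).mp hi).1
  rw [List.filter_map]
  have hcomp : ((fun x => decide (pvProd x = m)) ∘ (fun j => (i, j))) =
      fun j : Int => decide (i * j = m) := by
    funext j; simp [Function.comp, pvProd]
  rw [hcomp, pv_filter_range i m hi1 hm (min N2 i)]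
  by_cases hc : PySem.Int.mod m i = 0 ∧ PySem.Int.floordiv m i ≤ min N2 i
  · rw [if_pos hc, if_pos hc]; simp
  · rw [if_neg hc, if_neg hc]; simp

-- ---- membership in pvPairs gives positive components ----

theorem pv_mem_pairs {N1 N2 : Int} {x : Int × Int} (h : x ∈ pvPairs N1 N2) :
    1 ≤ x.1 ∧ 1 ≤ x.2 := by
  unfold pvPairs at h
  rcases List.mem_flatMap.mp h with ⟨i, hi, hx⟩
  rcases List.mem_map.mp hx with ⟨j, hj, rfl⟩
  exact ⟨((PySem.List.mem_pyRange_one).mp hi).1, ((PySem.List.mem_pyRange_one).mp hj).1⟩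

-- ===== VERDICT (by name: the statement is the Claim_ definition above) =====
theorem calc_number_boreholes_py_spec : Claim_equal_calc_number_boreholes_py := by
  unfold Claim_equal_calc_number_boreholes_py
  intro n N1 N2 _
  unfold Spec_calc_number_boreholes_py
  have hbest : (PySem.List.pyRange 1 (N1 + 1) 1).foldl
      (fun (best : Int) i =>
        let j := max 1 (-(PySem.Int.floordiv (-n) i))
        if j ≤ min N2 i then min best (i * j) else best) 400 =
      pvMv n (pvPairs N1 N2) := by
    rw [pv_best_eq, ← pv_mv_outer]
  have hBalt : calc_number_boreholes_py_alt n N1 N2 =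
      (if pvMv n (pvPairs N1 N2) = 400 then
        ((20 : Int), (20 : Int)) ::
          (PySem.List.pyRange 1 (N1 + 1) 1).filterMap (fun i =>
            if PySem.Int.mod (pvMv n (pvPairs N1 N2)) i = 0 ∧
                PySem.Int.floordiv (pvMv n (pvPairs N1 N2)) i ≤ min N2 i then
              some (i, PySem.Int.floordiv (pvMv n (pvPairs N1 N2)) i) else none)
      else
        (PySem.List.pyRange 1 (N1 + 1) 1).filterMap (fun i =>
          if PySem.Int.mod (pvMv n (pvPairs N1 N2)) i = 0 ∧
              PySem.Int.floordiv (pvMv n (pvPairs N1 N2)) i ≤ min N2 i then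
            some (i, PySem.Int.floordiv (pvMv n (pvPairs N1 N2)) i) else none)) := by
    unfold calc_number_boreholes_py_alt
    rw [hbest]
  rw [pvA_eq, pvA_char, hBalt]
  have hle : pvMv n (pvPairs N1 N2) ≤ 400 := pvMvF_le n (pvPairs N1 N2) 400
  by_cases hm : pvMv n (pvPairs N1 N2) < 400
  · have hm1 : 1 ≤ pvMv n (pvPairs N1 N2) := by
      rcases pvMvF_cases n (pvPairs N1 N2) 400 with h | ⟨x, hx, h1, _⟩
      · change pvMv n (pvPairs N1 N2) = 400 at h; omega
      · have hc := pv_mem_pairs hx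
        change pvMv n (pvPairs N1 N2) = pvProd x at h1
        have : (1 : Int) * 1 ≤ x.1 * x.2 :=
          mul_le_mul hc.1 hc.2 (by omega) (by omega)
        unfold pvProd at h1; omega
    rw [if_pos hm, if_neg (by omega)]
    exact pv_filter_pairs N1 N2 _ hm1
  · have h400 : pvMv n (pvPairs N1 N2) = 400 := by omega
    rw [if_neg hm, if_pos h400, h400]
    rw [pv_filter_pairs N1 N2 400 (by omega)]
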